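-- pv_equiv track=rewrite | github.com/maryamrabiee/INSTRAL | combine_insertions.py | read_placement_map
-- ===== SOURCE A (Python) =====
-- def read_placement_map(lines):
-- 	placements = {}
-- 	for line in lines:
-- 		if line.split()[1] in placements:
-- 			placements[line.split()[1]].append(line.split()[0])
-- 		else:
-- 			placements[line.split()[1]] = [line.split()[0]]
-- 	return placements
-- ===== SOURCE B (Python) =====
-- def read_placement_map(lines):
--     pairs = []
--     for line in lines:
--         toks = line.split()
--         pairs.append((toks[1], toks[0]))
--     keys = list(dict.fromkeys(k for k, _ in pairs))
--     return {k: [v for k2, v in pairs if k2 == k] for k in keys}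
-- ===== Notes on version B (the rewrite author's own statement) =====
-- stated objective: alternative
-- what changed: Replaces the single pass with a membership branch on a growing dict by a two-phase shape: first extract all (key, value) token pairs, then dedup the keys in first-occurrence order and build each group with a comprehension filtering the pair list.
import Mathlib
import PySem

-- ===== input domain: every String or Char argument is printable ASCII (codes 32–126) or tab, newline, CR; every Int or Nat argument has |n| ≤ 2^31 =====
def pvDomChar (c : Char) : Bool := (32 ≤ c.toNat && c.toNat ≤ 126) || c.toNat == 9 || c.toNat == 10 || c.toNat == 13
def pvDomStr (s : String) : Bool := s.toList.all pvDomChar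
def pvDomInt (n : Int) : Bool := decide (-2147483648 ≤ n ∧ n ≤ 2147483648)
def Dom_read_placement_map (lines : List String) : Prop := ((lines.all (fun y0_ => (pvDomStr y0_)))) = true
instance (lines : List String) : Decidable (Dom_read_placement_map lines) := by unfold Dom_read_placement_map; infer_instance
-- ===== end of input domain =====

-- B replaces A's one-pass dict-membership loop by extract-pairs, dedup keys in first-occurrence order, then filter-per-key grouping (alternative decomposition, same results).


-- ===== PORT A =====
-- A's loop body: the if/else on dict membership; line.split()[1] / [0] are pyGetD, in range under Pre_
def readPlacementStepA (d : PySem.Dict String (List String)) (line : String) : PySem.Dict String (List String) :=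
  let t := PySem.Str.split₀ line
  if d.contains (PySem.List.pyGetD t 1 "") then
    d.modify (PySem.List.pyGetD t 1 "") [] (fun l => l ++ [PySem.List.pyGetD t 0 ""])
  else
    d.insert (PySem.List.pyGetD t 1 "") [PySem.List.pyGetD t 0 ""]

def read_placement_map (lines : List String) : List (String × List String) :=
  (lines.foldl readPlacementStepA PySem.Dict.empty).items

-- ===== PORT B =====
def read_placement_map_alt (lines : List String) : List (String × List String) :=
  let pairs := lines.map (fun line =>
    let t := PySem.Str.split₀ line
    (PySem.List.pyGetD t 1 "", PySem.List.pyGetD t 0 ""))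
  let keys := PySem.List.dedup (pairs.map (·.1))
  keys.map (fun k => (k, (pairs.filter (fun p => p.1 == k)).map (·.2)))

-- ===== PRECONDITION & SPEC =====
-- Pre_ excludes inputs where some line has fewer than two whitespace tokens: there A raises IndexError (so does B).
def Pre_read_placement_map (lines : List String) : Prop :=
  ∀ line ∈ lines, 2 ≤ (PySem.Str.split₀ line).length
instance (lines : List String) : Decidable (Pre_read_placement_map lines) := by unfold Pre_read_placement_map; infer_instance
def pvWitness_read_placement_map : List String := ["a b", "c b", "d e"]

def Spec_read_placement_map (lines : List String) (out : List (String × List String)) : Prop := out = read_placement_map_alt lines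
instance (lines : List String) (out : List (String × List String)) : Decidable (Spec_read_placement_map lines out) := by unfold Spec_read_placement_map; infer_instance

-- ===== CLAIM (what is proved, stated in full; the proofs are below) =====
def Claim_equal_read_placement_map : Prop := ∀ (lines : List String), Dom_read_placement_map lines → Pre_read_placement_map lines → Spec_read_placement_map lines (read_placement_map lines)

-- ===== LEMMAS AND PROOFS =====

-- A's if/else step is exactly "d[k] = d.get(k, []) + [v]" (one Dict.modify), membership or not
lemma stepA_eq_modify (d : PySem.Dict String (List String)) (line : String) :
    readPlacementStepA d line =
      d.modify (PySem.List.pyGetD (PySem.Str.split₀ line) 1 "") []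
        (fun l => l ++ [PySem.List.pyGetD (PySem.Str.split₀ line) 0 ""]) := by
  unfold readPlacementStepA
  by_cases h : d.contains (PySem.List.pyGetD (PySem.Str.split₀ line) 1 "") = true
  · simp [h]
  · have h' : d.contains (PySem.List.pyGetD (PySem.Str.split₀ line) 1 "") = false := by
      simpa using h
    simp [h, PySem.Dict.modify, PySem.Dict.getD_of_not_contains d [] h']

-- the two ports agree on every input (Pre_ is only needed for faithfulness to the Pythons, not by this argument)
lemma read_placement_map_eq_alt (lines : List String) :
    read_placement_map lines = read_placement_map_alt lines := by
  have hfun : readPlacementStepA = fun d line =>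
      d.modify (PySem.List.pyGetD (PySem.Str.split₀ line) 1 "") []
        (fun l => l ++ [PySem.List.pyGetD (PySem.Str.split₀ line) 0 ""]) :=
    funext fun d => funext fun line => stepA_eq_modify d line
  unfold read_placement_map read_placement_map_alt
  rw [hfun]
  set g : String → String × String := fun line =>
    (PySem.List.pyGetD (PySem.Str.split₀ line) 1 "", PySem.List.pyGetD (PySem.Str.split₀ line) 0 "") with hg
  have hmap : lines.foldl (fun d line =>
      d.modify (PySem.List.pyGetD (PySem.Str.split₀ line) 1 "") []
        (fun l => l ++ [PySem.List.pyGetD (PySem.Str.split₀ line) 0 ""])) PySem.Dict.empty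
      = (lines.map g).foldl (fun d p => d.modify p.1 [] (fun l => l ++ [p.2])) PySem.Dict.empty := by
    rw [List.foldl_map]
  rw [hmap]
  set pairs := lines.map g with hp
  have hnd : ((pairs.foldl (fun d p => d.modify p.1 [] (fun l => l ++ [p.2])) PySem.Dict.empty)).keys.Nodup :=
    PySem.Dict.nodup_keys_foldl_modify_key pairs Prod.fst [] (fun _ p l => l ++ [p.2]) _ (by simp)
  rw [PySem.Dict.items_eq_map_keys _ hnd []]
  have hkeys : ((pairs.foldl (fun d p => d.modify p.1 [] (fun l => l ++ [p.2])) PySem.Dict.empty)).keys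
      = PySem.List.dedup (pairs.map (·.1)) := by
    rw [PySem.Dict.keys_foldl_modify_key pairs Prod.fst [] (fun _ p l => l ++ [p.2])]
    simp [PySem.Set.update_nil_left, PySem.List.dedup_eq_ofList]
  rw [hkeys]
  refine List.map_congr_left fun k hk => ?_
  rw [PySem.Dict.getD_foldl_modify_append]
  simp

-- ===== VERDICT (by name: the statement is the Claim_ definition above) =====
theorem read_placement_map_spec : Claim_equal_read_placement_map :=
  fun lines _ _ => read_placement_map_eq_alt lines
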